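-- pv_equiv track=rewrite | github.com/xpessoles/Informatique_PSI | 02_Piles/TD_02_Sable_2019/programmes/PileSable_2019_PROF.py | simulation_pile
-- ===== SOURCE A (Python) =====
-- def creer_pile(ht):
--     """
--     Crée et renvoie une pile de hauteur h :
--     Entrée :
--       * h(int)
--     Sortie :
--       * (list)
--     """
--     return ht*['']
--
-- def empiler(pile):
--     """
--     On empile forcément des "*". On effectue cela en place.
--     """
--     for i in range(len(pile)):
--         if pile[i] != "*" :
--             pile[i] = "*"
--             return None
--
-- def simulation_pile(ht,nb):
--     pile = creer_pile(ht)
--     simu = []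
--     simu.append(pile.copy())
--     for i in range(nb):
--         empiler(pile)
--         simu.append(pile.copy())
--     return simu
-- ===== SOURCE B (Python) =====
-- def simulation_pile(ht, nb):
--     h = max(ht, 0)
--     steps = max(nb, 0)
--     return [['*'] * min(i, h) + [''] * (h - min(i, h)) for i in range(steps + 1)]
-- ===== Notes on version B (the rewrite author's own statement) =====
-- stated objective: simpler
-- what changed: Replaces the incremental in-place pile simulation (mutating a shared pile with empiler each step and copying it) with a one-line comprehension that computes each snapshot directly by the closed form ['*']*min(i,h) + ['']*(h-min(i,h)).
import Mathlib
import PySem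

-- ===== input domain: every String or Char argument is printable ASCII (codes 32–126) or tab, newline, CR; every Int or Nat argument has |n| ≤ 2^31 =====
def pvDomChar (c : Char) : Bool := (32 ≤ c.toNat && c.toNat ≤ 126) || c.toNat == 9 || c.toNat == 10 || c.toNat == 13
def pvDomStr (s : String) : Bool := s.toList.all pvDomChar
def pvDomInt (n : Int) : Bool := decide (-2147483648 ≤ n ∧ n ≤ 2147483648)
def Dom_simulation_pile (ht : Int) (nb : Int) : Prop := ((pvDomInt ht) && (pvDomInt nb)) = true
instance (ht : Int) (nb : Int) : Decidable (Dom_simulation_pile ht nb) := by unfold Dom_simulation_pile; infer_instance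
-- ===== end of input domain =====

-- B replaces A's in-place pile simulation with a direct closed-form construction of each snapshot (objective: simpler).
-- A mutates its local pile in place; this is internal to A, callers observe only the return value.

-- ===== PORT A =====
-- creer_pile: ht*[''] (Python list repetition; negative ht yields [])
def creer_pile (ht : Int) : List String := List.replicate ht.toNat ""

-- empiler: scans the pile, turns the first non-"*" cell into "*" and stops (ported
-- as a function returning the updated pile, since the Python mutates in place)
def empiler : List String → List String
  | [] => []
  | x :: xs => if x ≠ "*" then "*" :: xs else x :: empiler xs

def simulation_pile (ht : Int) (nb : Int) : List (List String) :=
  let pile := creer_pile ht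
  let st := (PySem.List.pyRange 0 nb 1).foldl
    (fun (st : List (List String) × List String) _ =>
      let pile' := empiler st.2
      (st.1 ++ [pile'], pile')) ([pile], pile)
  st.1

-- ===== PORT B =====
def simulation_pile_alt (ht : Int) (nb : Int) : List (List String) :=
  let h := max ht 0
  (PySem.List.pyRange 0 (max nb 0 + 1) 1).map (fun i =>
    List.replicate (min i h).toNat "*" ++ List.replicate (h - min i h).toNat "")

-- ===== PRECONDITION & SPEC =====
def Spec_simulation_pile (ht : Int) (nb : Int) (out : List (List String)) : Prop := out = simulation_pile_alt ht nb
instance (ht : Int) (nb : Int) (out : List (List String)) : Decidable (Spec_simulation_pile ht nb out) := by unfold Spec_simulation_pile; infer_instance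

-- ===== CLAIM (what is proved, stated in full; the proofs are below) =====
def Claim_equal_simulation_pile : Prop := ∀ (ht : Int) (nb : Int), Dom_simulation_pile ht nb → Spec_simulation_pile ht nb (simulation_pile ht nb)

-- ===== LEMMAS AND PROOFS =====

-- the pile after i pushes into a pile of height h
def snap (h i : Nat) : List String :=
  List.replicate (min i h) "*" ++ List.replicate (h - min i h) ""

theorem empiler_stars (k : Nat) (rest : List String) :
    empiler (List.replicate k "*" ++ rest) =
      List.replicate k "*" ++ (match rest with
        | [] => []
        | x :: xs => if x ≠ "*" then "*" :: xs else x :: empiler xs) := by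
  induction k with
  | zero => cases rest <;> simp [empiler]
  | succ n ih => simp [List.replicate_succ, empiler, ih]

theorem empiler_snap (h i : Nat) : empiler (snap h i) = snap h (i + 1) := by
  unfold snap
  rcases lt_or_ge i h with hlt | hge
  · have h1 : min i h = i := by omega
    have h2 : min (i+1) h = i + 1 := by omega
    have h3 : h - i = (h - (i+1)) + 1 := by omega
    rw [h1, h2, h3, List.replicate_succ, empiler_stars]
    rw [List.replicate_succ' (n := i)]
    simp
  · have h1 : min i h = h := by omega
    have h2 : min (i+1) h = h := by omega
    have h3 : h - h = 0 := by omega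
    rw [h1, h2, h3]
    have := empiler_stars h ([] : List String)
    simpa using this

theorem foldl_snap (h i : Nat) (l : List Int) (simu : List (List String)) :
    l.foldl (fun (st : List (List String) × List String) _ =>
        (st.1 ++ [empiler st.2], empiler st.2)) (simu, snap h i) =
      (simu ++ (List.range l.length).map (fun j => snap h (i + 1 + j)), snap h (i + l.length)) := by
  induction l generalizing i simu with
  | nil => simp
  | cons a l ih =>
    simp only [List.foldl_cons, empiler_snap, ih (i+1), List.length_cons, Prod.mk.injEq]
    have hmap : List.map ((fun j => snap h (i + 1 + j)) ∘ Nat.succ) (List.range l.length)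
        = List.map (fun j => snap h (i + 1 + 1 + j)) (List.range l.length) := by
      apply List.map_congr_left; intro k _
      simp only [Function.comp_apply]; congr 1; omega
    rw [List.range_succ_eq_map, List.map_cons, List.map_map, hmap]
    refine ⟨by simp, ?_⟩
    congr 1; omega

theorem simulation_pile_eq (ht nb : Int) :
    simulation_pile ht nb = (List.range (nb.toNat + 1)).map (fun j => snap ht.toNat j) := by
  unfold simulation_pile
  have hpile : creer_pile ht = snap ht.toNat 0 := by simp [creer_pile, snap]
  simp only [hpile]
  have := foldl_snap ht.toNat 0 (PySem.List.pyRange 0 nb 1) [snap ht.toNat 0]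
  simp only [this, PySem.List.length_pyRange_one]
  have hmap : List.map ((fun j => snap ht.toNat j) ∘ Nat.succ) (List.range nb.toNat)
      = List.map (fun j => snap ht.toNat (0 + 1 + j)) (List.range nb.toNat) := by
    apply List.map_congr_left; intro k _
    simp only [Function.comp_apply]; congr 1; omega
  rw [List.range_succ_eq_map, List.map_cons, List.map_map, hmap]
  simp

theorem simulation_pile_alt_eq (ht nb : Int) :
    simulation_pile_alt ht nb = (List.range (nb.toNat + 1)).map (fun j => snap ht.toNat j) := by
  unfold simulation_pile_alt
  rw [PySem.List.pyRange_one]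
  have hlen : (max nb 0 + 1 - 0).toNat = nb.toNat + 1 := by omega
  rw [hlen, List.map_map]
  apply List.map_congr_left
  intro k _
  simp only [Function.comp, snap]
  have h1 : (min ((0:Int) + k) (max ht 0)).toNat = min k ht.toNat := by omega
  have h2 : (max ht 0 - min ((0:Int) + k) (max ht 0)).toNat = ht.toNat - min k ht.toNat := by omega
  rw [h1, h2]

-- ===== VERDICT (by name: the statement is the Claim_ definition above) =====
theorem simulation_pile_spec : Claim_equal_simulation_pile := by
  intro ht nb _
  unfold Spec_simulation_pile
  rw [simulation_pile_eq, simulation_pile_alt_eq]
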